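-- pv_equiv track=rewrite | github.com/meghanshubhatt09/Leet-Code-Solved | 290-word-pattern/290-word-pattern.py | pattern_dict
-- ===== SOURCE A (Python) =====
-- def pattern_dict(pattern):
--
--     pattern_count = 1
--     i = 0
--     my_pattern_dict = {}
--
--     while(i < len(pattern)):
--         if pattern[i] not in my_pattern_dict:
--             my_pattern_dict[pattern[i]] = pattern_count
--             pattern_count += 1
--         i+=1
--     return my_pattern_dict
-- ===== SOURCE B (Python) =====
-- def pattern_dict(pattern):
--     # Recursive strip-and-shift: the first character gets rank 1; remove all its
--     # occurrences, rank the remainder recursively, and shift those ranks up by 1.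
--     if not pattern:
--         return {}
--     c = pattern[0]
--     sub = pattern_dict(pattern.replace(c, ''))
--     return {c: 1, **{k: v + 1 for k, v in sub.items()}}
-- ===== Notes on version B (the rewrite author's own statement) =====
-- stated objective: alternative
-- what changed: Replaces A's single counter/membership pass building a dict by a recursive divide-and-conquer: rank the first character 1, strip all its occurrences with str.replace, recurse on the remainder, and shift the recursive ranks up by one.
import Mathlib
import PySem

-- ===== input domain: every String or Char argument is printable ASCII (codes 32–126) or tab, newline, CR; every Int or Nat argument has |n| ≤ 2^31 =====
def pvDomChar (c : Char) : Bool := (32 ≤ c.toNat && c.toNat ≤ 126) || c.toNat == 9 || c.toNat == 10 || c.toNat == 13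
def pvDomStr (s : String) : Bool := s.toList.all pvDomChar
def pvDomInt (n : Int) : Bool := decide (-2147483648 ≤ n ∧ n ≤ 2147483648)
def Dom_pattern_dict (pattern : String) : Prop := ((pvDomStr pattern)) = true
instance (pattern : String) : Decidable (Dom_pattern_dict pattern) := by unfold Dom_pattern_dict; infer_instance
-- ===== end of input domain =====

-- B replaces A's counter/membership pass by recursion: rank the first char 1,
-- strip its occurrences, recurse, shift the recursive ranks by one (alternative).

-- ===== PORT A =====
-- A's while-loop over indices 0..len-1: ported as structural recursion over the
-- character list (the loop visits pattern[i] for i = 0,1,… in order), carrying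
-- the same state (pattern_count, the dict under construction).
def pattern_dict_go (cs : List Char) (cnt : Int) (d : PySem.Dict String Int) :
    PySem.Dict String Int :=
  match cs with
  | [] => d
  | c :: rest =>
    if d.contains (String.ofList [c]) = false then
      pattern_dict_go rest (cnt + 1) (d.insert (String.ofList [c]) cnt)
    else
      pattern_dict_go rest cnt d

def pattern_dict (pattern : String) : List (String × Int) :=
  (pattern_dict_go pattern.toList 1 PySem.Dict.empty).items

-- ===== PORT B =====
-- B: if not pattern: return {}; c = pattern[0];
--    sub = pattern_dict(pattern.replace(c, ''));
--    return {c: 1, **{k: v + 1 for k, v in sub.items()}}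
-- pattern.replace(c, '') on the character list is cs.filter (· ≠ c).
def pattern_dict_alt_go (cs : List Char) : List (String × Int) :=
  match cs with
  | [] => []
  | c :: rest =>
    let sub := pattern_dict_alt_go (rest.filter (fun x => x ≠ c))
    (String.ofList [c], 1) :: sub.map (fun p => (p.1, p.2 + 1))
termination_by cs.length
decreasing_by
  simp only [List.length_cons, List.length_unattach, Nat.lt_succ_iff]
  exact le_trans (List.length_filter_le _ _) (by simp)

def pattern_dict_alt (pattern : String) : List (String × Int) :=
  pattern_dict_alt_go pattern.toList

-- ===== PRECONDITION & SPEC =====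
def Spec_pattern_dict (pattern : String) (out : List (String × Int)) : Prop := out = pattern_dict_alt pattern
instance (pattern : String) (out : List (String × Int)) : Decidable (Spec_pattern_dict pattern out) := by unfold Spec_pattern_dict; infer_instance

-- ===== CLAIM (what is proved, stated in full; the proofs are below) =====
def Claim_equal_pattern_dict : Prop := ∀ (pattern : String), Dom_pattern_dict pattern → Spec_pattern_dict pattern (pattern_dict pattern)

-- ===== LEMMAS AND PROOFS =====

-- A-side canonical form: numbering of a seen-list S of keys, [(S[0],1), (S[1],2), …]
def pvToD (S : List String) : List (String × Int) :=
  (PySem.List.enumerate S 1).map (fun p => (p.2, p.1))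

theorem pvToD_keys (S : List String) : (pvToD S).map (·.1) = S := by
  simp [pvToD, Function.comp_def]

theorem pvToD_append (S : List String) (k : String) :
    pvToD (S ++ [k]) = pvToD S ++ [(k, (S.length : Int) + 1)] := by
  simp [pvToD, PySem.List.enumerate_append, PySem.List.enumerate_cons,
    PySem.List.enumerate_nil]
  omega

-- Loop invariant for A: starting from the dict whose items are pvToD S with counter
-- |S|+1, A's loop ends with items pvToD (S extended by the new first occurrences).
theorem pattern_dict_go_inv (cs : List Char) :
    ∀ (S : List String), S.Nodup →
    (pattern_dict_go cs ((S.length : Int) + 1) (PySem.Dict.mk (pvToD S))).items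
      = pvToD (List.foldl PySem.Set.add S (cs.map (fun c => String.ofList [c]))) := by
  induction cs with
  | nil => intro S _; rfl
  | cons c rest ih =>
    intro S hS
    have hcont : (PySem.Dict.mk (pvToD S)).contains (String.ofList [c])
        = decide (String.ofList [c] ∈ S) := by
      rw [PySem.Dict.contains_eq_decide_mem_keys]
      simp [PySem.Dict.keys, pvToD_keys]
    rw [List.map_cons, List.foldl_cons]
    by_cases hmem : String.ofList [c] ∈ S
    · have hct : (PySem.Dict.mk (pvToD S)).contains (String.ofList [c]) = true := by
        rw [hcont]; simp [hmem]
      have hadd : PySem.Set.add S (String.ofList [c]) = S := by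
        simp [PySem.Set.add, PySem.Set.contains, hmem]
      rw [show pattern_dict_go (c :: rest) ((S.length : Int) + 1) (PySem.Dict.mk (pvToD S))
            = pattern_dict_go rest ((S.length : Int) + 1) (PySem.Dict.mk (pvToD S)) by
          simp only [pattern_dict_go, hct]
          simp, hadd]
      exact ih S hS
    · have hcf : (PySem.Dict.mk (pvToD S)).contains (String.ofList [c]) = false := by
        rw [hcont]; simp [hmem]
      have hadd : PySem.Set.add S (String.ofList [c]) = S ++ [String.ofList [c]] := by
        simp [PySem.Set.add, PySem.Set.contains, hmem]
      have hins : (PySem.Dict.mk (pvToD S)).insert (String.ofList [c]) ((S.length : Int) + 1)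
          = PySem.Dict.mk (pvToD (S ++ [String.ofList [c]])) := by
        apply PySem.Dict.ext
        rw [PySem.Dict.items_insert_of_not_contains _ _ hcf]
        simp [pvToD_append]
      rw [show pattern_dict_go (c :: rest) ((S.length : Int) + 1) (PySem.Dict.mk (pvToD S))
            = pattern_dict_go rest (((S ++ [String.ofList [c]]).length : Int) + 1)
                (PySem.Dict.mk (pvToD (S ++ [String.ofList [c]]))) by
          simp only [pattern_dict_go, hcf]
          rw [if_pos trivial, hins,
            show ((S.length : Int) + 1) + 1 = (((S ++ [String.ofList [c]]).length : Int) + 1) by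
              simp], hadd]
      have hnd : (S ++ [String.ofList [c]]).Nodup := by
        simp [List.nodup_append, hS]
        intro a ha h
        exact hmem (h ▸ ha)
      exact ih _ hnd

-- Character-level canonical form shared by both sides.
def pvToDc (S : List Char) : List (String × Int) :=
  (PySem.List.enumerate S 1).map (fun p => (String.ofList [p.2], p.1))

theorem pv_enumerate_shift {α : Type} (S : List α) :
    ∀ n : Int, PySem.List.enumerate S (n + 1)
      = (PySem.List.enumerate S n).map (fun p => (p.1 + 1, p.2)) := by
  induction S with
  | nil => intro n; simp [PySem.List.enumerate_nil]
  | cons x xs ih =>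
    intro n
    simp [PySem.List.enumerate_cons, ih (n + 1)]

theorem pvToDc_cons (c : Char) (S : List Char) :
    pvToDc (c :: S)
      = (String.ofList [c], 1) :: (pvToDc S).map (fun p => (p.1, p.2 + 1)) := by
  simp only [pvToDc, PySem.List.enumerate_cons, pv_enumerate_shift S 1,
    List.map_map, List.map_cons, Function.comp_def]

-- Stripping a character commutes with Set accumulation.
theorem pv_foldl_add_cons (xs : List Char) :
    ∀ (S : List Char) (c : Char),
      List.foldl PySem.Set.add (c :: S) xs
        = c :: List.foldl PySem.Set.add S (xs.filter (fun x => x ≠ c)) := by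
  induction xs with
  | nil => intro S c; rfl
  | cons x xs ih =>
    intro S c
    rw [List.foldl_cons, List.filter_cons]
    by_cases hx : x = c
    · subst hx
      rw [PySem.Set.add_of_mem (List.mem_cons_self ..)]
      simp only [ne_eq, not_true_eq_false, decide_false, Bool.false_eq_true, if_false]
      exact ih S x
    · have hdec : (decide (x ≠ c)) = true := by simp [hx]
      rw [if_pos hdec, List.foldl_cons]
      by_cases hm : x ∈ S
      · rw [PySem.Set.add_of_mem (List.mem_cons_of_mem _ hm), PySem.Set.add_of_mem hm]
        exact ih S c
      · have hnc : x ∉ c :: S := by simp [hx, hm]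
        rw [PySem.Set.add_of_not_mem hnc, PySem.Set.add_of_not_mem hm]
        exact ih (S ++ [x]) c

theorem pv_ofList_cons (c : Char) (rest : List Char) :
    PySem.Set.ofList (c :: rest)
      = c :: PySem.Set.ofList (rest.filter (fun x => x ≠ c)) := by
  show List.foldl PySem.Set.add PySem.Set.empty (c :: rest) = _
  rw [List.foldl_cons]
  have : PySem.Set.add PySem.Set.empty c = [c] := rfl
  rw [this]
  exact pv_foldl_add_cons rest [] c

-- B equals the canonical numbering of the deduplicated characters.
theorem pattern_dict_alt_go_eq (n : Nat) :
    ∀ (cs : List Char), cs.length ≤ n →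
      pattern_dict_alt_go cs = pvToDc (PySem.Set.ofList cs) := by
  induction n with
  | zero =>
    intro cs h
    have : cs = [] := List.eq_nil_of_length_eq_zero (Nat.le_zero.mp h)
    subst this
    simp [pattern_dict_alt_go, pvToDc, PySem.List.enumerate_nil, PySem.Set.ofList]
  | succ n ih =>
    intro cs h
    match cs with
    | [] => simp [pattern_dict_alt_go, pvToDc, PySem.List.enumerate_nil, PySem.Set.ofList]
    | c :: rest =>
      have hlen : (rest.filter (fun x => x ≠ c)).length ≤ n := by
        have := List.length_filter_le (fun x => decide (x ≠ c)) rest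
        simp only [List.length_cons, Nat.succ_le_succ_iff] at h
        omega
      rw [pattern_dict_alt_go, ih _ hlen, pv_ofList_cons, pvToDc_cons]

-- Bridge: string-level numbering of mapped chars = char-level numbering.
theorem pv_enumerate_map {α β : Type} (f : α → β) (S : List α) :
    ∀ n : Int, PySem.List.enumerate (S.map f) n
      = (PySem.List.enumerate S n).map (fun p => (p.1, f p.2)) := by
  induction S with
  | nil => intro n; simp [PySem.List.enumerate_nil]
  | cons x xs ih => intro n; simp [PySem.List.enumerate_cons, ih]

theorem pvToD_map (S : List Char) :
    pvToD (S.map (fun c => String.ofList [c])) = pvToDc S := by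
  simp [pvToD, pvToDc, pv_enumerate_map]

theorem pv_ofList_map_inj {α β : Type} [DecidableEq α] [DecidableEq β]
    (f : α → β) (hf : Function.Injective f) (xs : List α) :
    ∀ S : List α, List.foldl PySem.Set.add (S.map f) (xs.map f)
      = (List.foldl PySem.Set.add S xs).map f := by
  induction xs with
  | nil => intro S; rfl
  | cons x xs ih =>
    intro S
    have hc : PySem.Set.add (S.map f) (f x) = (PySem.Set.add S x).map f := by
      by_cases hm : x ∈ S
      · simp [PySem.Set.add, PySem.Set.contains, hm, List.mem_map_of_mem]
      · have : f x ∉ S.map f := by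
          intro hmem
          obtain ⟨y, hy, hfy⟩ := List.mem_map.mp hmem
          exact hm (hf hfy ▸ hy)
        simp [PySem.Set.add, PySem.Set.contains, hm, this]
    simp only [List.map_cons, List.foldl_cons, hc]
    exact ih _

-- ===== VERDICT (by name: the statement is the Claim_ definition above) =====
theorem pattern_dict_spec : Claim_equal_pattern_dict := by
  intro pattern _
  unfold Spec_pattern_dict pattern_dict pattern_dict_alt
  have h := pattern_dict_go_inv pattern.toList [] (List.nodup_nil)
  simp only [List.length_nil, Nat.cast_zero, zero_add] at h
  have hempty : PySem.Dict.empty = PySem.Dict.mk (pvToD ([] : List String)) := rfl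
  rw [hempty, h]
  have hinj : Function.Injective (fun c : Char => String.ofList [c]) := by
    intro a b hab
    have : ([a] : List Char) = [b] := by
      have := congrArg String.toList hab
      simpa using this
    simpa using this
  have hmap := pv_ofList_map_inj _ hinj pattern.toList ([] : List Char)
  simp only [List.map_nil] at hmap
  rw [hmap, pvToD_map,
    pattern_dict_alt_go_eq pattern.toList.length pattern.toList (le_refl _),
    PySem.Set.ofList_eq_foldl]
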